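-- pv_equiv track=rewrite | github.com/huenique/aliexpress-store-scraper | captcha_solver.py | should_use_captcha_solver
-- ===== SOURCE A (Python) =====
-- def should_use_captcha_solver(html_content: str) -> bool:
--     """
--     Determine if captcha solver should be used based on page content
--
--     Args:
--         html_content: HTML content to analyze
--
--     Returns:
--         True if captcha solving is needed
--     """
--     captcha_indicators = [
--         "captcha",
--         "nc_iconfont",
--         "btn_slide",
--         "slider",
--         "verify",
--         "security",
--         "challenge",
--     ]
--
--     html_lower = html_content.lower()
--     return any(indicator in html_lower for indicator in captcha_indicators)
-- ===== SOURCE B (Python) =====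
-- _PATTERNS = [
--     "captcha",
--     "nc_iconfont",
--     "btn_slide",
--     "slider",
--     "verify",
--     "security",
--     "challenge",
-- ]
--
--
-- def should_use_captcha_solver(html_content: str) -> bool:
--     """
--     Determine if captcha solver should be used based on page content.
--
--     Single left-to-right pass that simulates the multi-pattern NFA: `active`
--     holds the remaining suffixes of partially matched indicators; each
--     character (lowercased on the fly) advances or drops those partial
--     matches and may start new ones.
--     """
--     active = []
--     for ch in html_content:
--         c = ch.lower()
--         nxt = []
--         for suf in _PATTERNS + active:
--             if suf[0] == c:
--                 rest = suf[1:]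
--                 if not rest:
--                     return True
--                 nxt.append(rest)
--         active = nxt
--     return False
-- ===== Notes on version B (the rewrite author's own statement) =====
-- stated objective: alternative
-- what changed: Replaces the lowercase-whole-string-then-seven-separate-substring-scans with a single left-to-right pass that simulates the multi-pattern NFA, maintaining a frontier of partially matched indicator suffixes and lowercasing each character on the fly.
import Mathlib
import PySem

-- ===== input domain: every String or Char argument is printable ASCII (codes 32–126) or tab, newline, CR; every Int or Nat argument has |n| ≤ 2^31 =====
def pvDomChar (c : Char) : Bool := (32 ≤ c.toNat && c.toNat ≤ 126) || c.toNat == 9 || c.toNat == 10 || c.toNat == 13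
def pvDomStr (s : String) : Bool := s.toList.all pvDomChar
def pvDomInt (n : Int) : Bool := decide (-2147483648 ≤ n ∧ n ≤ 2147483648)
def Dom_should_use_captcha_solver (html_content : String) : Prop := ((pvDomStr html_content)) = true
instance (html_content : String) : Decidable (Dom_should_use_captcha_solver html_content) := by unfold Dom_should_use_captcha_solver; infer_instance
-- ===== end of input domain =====

-- B replaces the lowercase-then-seven-substring-scans by a single left-to-right
-- NFA-simulation pass keeping a frontier of partially matched indicator suffixes
-- (alternative algorithm; same result).


-- ===== PORT A =====
def should_use_captcha_solver (html_content : String) : Bool :=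
  let captcha_indicators : List String :=
    ["captcha", "nc_iconfont", "btn_slide", "slider", "verify", "security", "challenge"]
  let html_lower := PySem.Str.lower html_content
  captcha_indicators.any (fun indicator => PySem.Str.isIn indicator html_lower)

-- ===== PORT B =====
-- the module-level _PATTERNS list of Source B, as character lists
def pvPats : List (List Char) :=
  ["captcha", "nc_iconfont", "btn_slide", "slider", "verify", "security", "challenge"].map
    String.toList

-- body of Source B's inner loop: advance/drop one partial match (acc = (returned?, nxt))
def pvInner (c : Char) (acc : Bool × List (List Char)) (suf : List Char) :
    Bool × List (List Char) :=
  if acc.1 then acc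
  else
    match suf with
    | [] => acc  -- unreachable: frontier suffixes are never empty
    | x :: rest =>
      if x == c then
        if rest.isEmpty then (true, acc.2) else (false, acc.2 ++ [rest])
      else acc

-- body of Source B's outer loop: one character step ('return True' modelled by a flag
-- that freezes the state)
def pvStep (st : Bool × List (List Char)) (ch : Char) : Bool × List (List Char) :=
  if st.1 then st
  else (pvPats ++ st.2).foldl (pvInner (PySem.Chars.lowerChar ch)) (false, [])

def should_use_captcha_solver_alt (html_content : String) : Bool :=
  (html_content.toList.foldl pvStep (false, [])).1

-- ===== PRECONDITION & SPEC =====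
def Spec_should_use_captcha_solver (html_content : String) (out : Bool) : Prop := out = should_use_captcha_solver_alt html_content
instance (html_content : String) (out : Bool) : Decidable (Spec_should_use_captcha_solver html_content out) := by unfold Spec_should_use_captcha_solver; infer_instance

-- ===== CLAIM (what is proved, stated in full; the proofs are below) =====
def Claim_equal_should_use_captcha_solver : Prop := ∀ (html_content : String), Dom_should_use_captcha_solver html_content → Spec_should_use_captcha_solver html_content (should_use_captcha_solver html_content)

-- ===== LEMMAS AND PROOFS =====

-- the loop invariant: after processing text t (lowered as l = t.map lowerChar),
-- the flag says "some indicator is an infix of l", and (while the flag is down)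
-- the frontier holds exactly the remaining suffixes `suf` of indicators whose
-- consumed nonempty prefix `q` is a suffix of l.
def pvInv (l : List Char) (st : Bool × List (List Char)) : Prop :=
  (st.1 = true ↔ ∃ p ∈ pvPats, p <:+: l) ∧
  (st.1 = false → ∀ suf, suf ∈ st.2 ↔
    ∃ p ∈ pvPats, ∃ q, p = q ++ suf ∧ q ≠ [] ∧ suf ≠ [] ∧ q <:+ l)

theorem pvPats_ne_nil : ∀ p ∈ pvPats, p ≠ [] := by decide

-- once the inner fold has fired, it stays fired with an unchanged frontier
theorem pvInner_fold_true (c : Char) (l : List (List Char)) (a : List (List Char)) :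
    l.foldl (pvInner c) (true, a) = (true, a) := by
  induction l with
  | nil => rfl
  | cons x xs ih => simpa [pvInner] using ih

-- the inner fold's flag: fired iff some candidate is exactly [c]
theorem pvInner_fold_fst (c : Char) (l : List (List Char)) (a : List (List Char)) :
    (l.foldl (pvInner c) (false, a)).1 = true ↔ ∃ suf ∈ l, suf = [c] := by
  induction l generalizing a with
  | nil => simp
  | cons x xs ih =>
    rcases x with _ | ⟨y, rest⟩
    · rw [List.foldl_cons, show pvInner c (false, a) [] = (false, a) from by simp [pvInner],
        ih]
      simp
    · by_cases hy : y = c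
      · rcases rest with _ | ⟨z, zs⟩
        · rw [List.foldl_cons,
            show pvInner c (false, a) [y] = (true, a) from by simp [pvInner, hy],
            pvInner_fold_true]
          simp [hy]
        · rw [List.foldl_cons,
            show pvInner c (false, a) (y :: z :: zs) = (false, a ++ [z :: zs]) from by
              simp [pvInner, hy],
            ih]
          constructor
          · rintro ⟨suf, hm, rfl⟩
            exact ⟨[c], List.mem_cons_of_mem _ hm, rfl⟩
          · rintro ⟨suf, hm, rfl⟩
            rcases List.mem_cons.mp hm with h | h
            · exact absurd h.symm (by simp)
            · exact ⟨[c], h, rfl⟩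
      · rw [List.foldl_cons,
          show pvInner c (false, a) (y :: rest) = (false, a) from by simp [pvInner, hy],
          ih]
        constructor
        · rintro ⟨suf, hm, rfl⟩
          exact ⟨[c], List.mem_cons_of_mem _ hm, rfl⟩
        · rintro ⟨suf, hm, rfl⟩
          rcases List.mem_cons.mp hm with h | h
          · exact absurd h (by intro hh; injection hh with h1 _; exact hy h1.symm)
          · exact ⟨[c], h, rfl⟩

-- the inner fold's frontier, while the flag stays down
theorem pvInner_fold_snd (c : Char) (l : List (List Char)) (a : List (List Char))
    (hres : (l.foldl (pvInner c) (false, a)).1 = false) :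
    ∀ s, s ∈ (l.foldl (pvInner c) (false, a)).2 ↔ s ∈ a ∨ ((c :: s) ∈ l ∧ s ≠ []) := by
  induction l generalizing a with
  | nil => simp
  | cons x xs ih =>
    rcases x with _ | ⟨y, rest⟩
    · rw [List.foldl_cons, show pvInner c (false, a) [] = (false, a) from by simp [pvInner]]
        at hres ⊢
      intro s
      rw [ih a hres s]
      simp
    · by_cases hy : y = c
      · rcases rest with _ | ⟨z, zs⟩
        · rw [List.foldl_cons,
            show pvInner c (false, a) [y] = (true, a) from by simp [pvInner, hy],
            pvInner_fold_true] at hres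
          exact absurd hres (by simp)
        · rw [List.foldl_cons,
            show pvInner c (false, a) (y :: z :: zs) = (false, a ++ [z :: zs]) from by
              simp [pvInner, hy]] at hres ⊢
          intro s
          rw [ih _ hres s]
          constructor
          · rintro (h | ⟨h1, h2⟩)
            · rcases List.mem_append.mp h with h | h
              · exact Or.inl h
              · simp only [List.mem_singleton] at h
                subst h
                exact Or.inr ⟨by rw [← hy]; exact List.mem_cons_self .., by simp⟩
            · exact Or.inr ⟨List.mem_cons_of_mem _ h1, h2⟩
          · rintro (h | ⟨h1, h2⟩)
            · exact Or.inl (List.mem_append_left _ h)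
            · rcases List.mem_cons.mp h1 with h1 | h1
              · injection h1 with _ h1
                exact Or.inl (List.mem_append_right _ (by simp [h1]))
              · exact Or.inr ⟨h1, h2⟩
      · rw [List.foldl_cons,
          show pvInner c (false, a) (y :: rest) = (false, a) from by simp [pvInner, hy]]
          at hres ⊢
        intro s
        rw [ih a hres s]
        constructor
        · rintro (h | ⟨h1, h2⟩)
          · exact Or.inl h
          · exact Or.inr ⟨List.mem_cons_of_mem _ h1, h2⟩
        · rintro (h | ⟨h1, h2⟩)
          · exact Or.inl h
          · rcases List.mem_cons.mp h1 with h1 | h1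
            · exact absurd h1 (by intro hh; injection hh with h1' _; exact hy h1'.symm)
            · exact Or.inr ⟨h1, h2⟩

-- a nonempty suffix of l ++ [c] ends with c
theorem suffix_concat_iff {q l : List Char} {c : Char} (hq : q ≠ []) :
    q <:+ l ++ [c] ↔ ∃ r, q = r ++ [c] ∧ r <:+ l := by
  constructor
  · intro h
    have h' : q.reverse <+: c :: l.reverse := by
      simpa using List.reverse_prefix.mpr h
    cases hq2 : q.reverse with
    | nil => exact absurd (by simpa using hq2) hq
    | cons x xs =>
      rw [hq2, List.cons_prefix_cons] at h'
      obtain ⟨rfl, hxs⟩ := h'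
      refine ⟨xs.reverse, ?_, ?_⟩
      · have hqq : q = (x :: xs).reverse := by rw [← hq2, List.reverse_reverse]
        simpa using hqq
      · exact List.reverse_prefix.mp (by simpa using hxs)
  · rintro ⟨r, rfl, u, hu⟩
    exact ⟨u, by rw [← List.append_assoc, hu]⟩

-- an infix of l ++ [c] is an infix of l or ends exactly at the appended c
theorem infix_concat_iff {p l : List Char} {c : Char} (hp : p ≠ []) :
    p <:+: l ++ [c] ↔ p <:+: l ∨ ∃ q, p = q ++ [c] ∧ q <:+ l := by
  constructor
  · intro h
    have h' : p.reverse <:+: c :: l.reverse := by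
      simpa using List.reverse_infix.mpr h
    rcases List.infix_cons_iff.mp h' with h' | h'
    · right
      have hsuf : p <:+ l ++ [c] := List.reverse_prefix.mp (by simpa using h')
      exact (suffix_concat_iff hp).mp hsuf
    · left
      exact List.reverse_infix.mp (by simpa using h')
  · rintro (h | ⟨q, rfl, hq⟩)
    · exact h.trans ⟨[], [c], by simp⟩
    · exact ((suffix_concat_iff hp).mpr ⟨q, rfl, hq⟩).isInfix

-- appending the matched char to a suffix of l gives a suffix of l ++ [c]
theorem suffix_append_char {q l : List Char} {c : Char} (h : q <:+ l) :
    q ++ [c] <:+ l ++ [c] := by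
  obtain ⟨u, hu⟩ := h
  exact ⟨u, by rw [← List.append_assoc, hu]⟩

-- one outer step preserves the invariant
theorem pvStep_inv (l : List Char) (st : Bool × List (List Char)) (ch : Char)
    (h : pvInv l st) : pvInv (l ++ [PySem.Chars.lowerChar ch]) (pvStep st ch) := by
  obtain ⟨h1, h2⟩ := h
  set c := PySem.Chars.lowerChar ch with hc
  by_cases hf : st.1 = true
  · -- already found: state frozen, the infix property is monotone
    rw [pvStep, if_pos hf]
    refine ⟨?_, fun hcontra => absurd hf (by simp [hcontra])⟩
    rw [hf]
    simp only [true_iff]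
    obtain ⟨p, hp, hinf⟩ := h1.mp hf
    exact ⟨p, hp, hinf.trans ⟨[], [c], by simp⟩⟩
  · have hf' : st.1 = false := by simpa using hf
    rw [pvStep, if_neg hf]
    have hmem := h2 hf'
    -- "some candidate is exactly [c]"  ↔  "some indicator is an infix of l ++ [c]"
    have hcand : (∃ suf ∈ pvPats ++ st.2, suf = [c]) ↔ ∃ p ∈ pvPats, p <:+: l ++ [c] := by
      constructor
      · rintro ⟨suf, hsuf, rfl⟩
        rcases List.mem_append.mp hsuf with hin | hin
        · exact ⟨[c], hin, ⟨l, [], by simp⟩⟩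
        · obtain ⟨p, hp, q, hpq, hqne, -, hql⟩ := (hmem _).mp hin
          refine ⟨p, hp, ?_⟩
          rw [infix_concat_iff (pvPats_ne_nil p hp)]
          exact Or.inr ⟨q, hpq, hql⟩
      · rintro ⟨p, hp, hinf⟩
        rw [infix_concat_iff (pvPats_ne_nil p hp)] at hinf
        rcases hinf with hinf | ⟨q, hpq, hql⟩
        · exact absurd (h1.mpr ⟨p, hp, hinf⟩) (by simp [hf'])
        · by_cases hqn : q = []
          · subst hqn; simp at hpq
            exact ⟨[c], List.mem_append_left _ (hpq ▸ hp), rfl⟩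
          · exact ⟨[c], List.mem_append_right _
              ((hmem [c]).mpr ⟨p, hp, q, hpq, hqn, by simp, hql⟩), rfl⟩
    constructor
    · rw [pvInner_fold_fst]
      exact hcand
    · intro hns suf
      rw [pvInner_fold_snd c _ [] hns suf]
      simp only [List.mem_nil_iff, false_or]
      constructor
      · rintro ⟨hin, hsne⟩
        rcases List.mem_append.mp hin with hin | hin
        · exact ⟨c :: suf, hin, [c], rfl, by simp, hsne, ⟨l, rfl⟩⟩
        · obtain ⟨p, hp, q', hpq, hqne, -, hql⟩ := (hmem _).mp hin
          refine ⟨p, hp, q' ++ [c], by simp [hpq], by simp, hsne,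
            suffix_append_char hql⟩
      · rintro ⟨p, hp, q, hpq, hqne, hsne, hql⟩
        refine ⟨?_, hsne⟩
        rw [suffix_concat_iff hqne] at hql
        obtain ⟨r, rfl, hrl⟩ := hql
        by_cases hr : r = []
        · subst hr
          simp only [List.nil_append] at hpq
          exact List.mem_append_left _ (by rw [show c :: suf = p from by simp [hpq]]; exact hp)
        · refine List.mem_append_right _ ((hmem _).mpr ⟨p, hp, r, ?_, hr, by simp, hrl⟩)
          simp [hpq]

-- the invariant propagates through the whole text
theorem pv_fold_inv (cs : List Char) : ∀ (l : List Char) (st : Bool × List (List Char)),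
    pvInv l st → pvInv (l ++ cs.map PySem.Chars.lowerChar) (cs.foldl pvStep st) := by
  induction cs with
  | nil => intro l st h; simpa using h
  | cons c cs ih =>
    intro l st h
    have := ih (l ++ [PySem.Chars.lowerChar c]) (pvStep st c) (pvStep_inv l st c h)
    simpa [List.append_assoc] using this

theorem pvInv_init : pvInv [] (false, []) := by
  constructor
  · simp only [Bool.false_eq_true, false_iff]
    rintro ⟨p, hp, hinf⟩
    exact pvPats_ne_nil p hp (List.eq_nil_of_infix_nil hinf)
  · intro _ suf
    simp only [List.mem_nil_iff, false_iff]
    rintro ⟨p, hp, q, hpq, hqne, hsne, hql⟩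
    exact hqne (List.eq_nil_of_suffix_nil hql)

-- B's characterization
theorem alt_iff (s : String) : should_use_captcha_solver_alt s = true ↔
    ∃ p ∈ pvPats, p <:+: s.toList.map PySem.Chars.lowerChar := by
  have h := pv_fold_inv s.toList [] (false, []) pvInv_init
  simpa [should_use_captcha_solver_alt] using h.1

-- ===== VERDICT (by name: the statement is the Claim_ definition above) =====
theorem should_use_captcha_solver_spec : Claim_equal_should_use_captcha_solver := by
  intro s _
  unfold Spec_should_use_captcha_solver
  have ha : should_use_captcha_solver s = true ↔
      ∃ p ∈ pvPats, p <:+: s.toList.map PySem.Chars.lowerChar := by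
    simp only [should_use_captcha_solver, List.any_eq_true, PySem.Str.isIn_iff_infix]
    constructor
    · rintro ⟨ind, hind, hinf⟩
      exact ⟨ind.toList, List.mem_map_of_mem hind,
        by simpa [PySem.Chars.lower] using hinf⟩
    · rintro ⟨p, hp, hinf⟩
      obtain ⟨ind, hind, rfl⟩ := List.mem_map.mp hp
      exact ⟨ind, hind, by simpa [PySem.Chars.lower] using hinf⟩
  have hb := alt_iff s
  cases hB : should_use_captcha_solver_alt s
  · cases hA : should_use_captcha_solver s
    · rfl
    · exact absurd (hb.mpr (ha.mp hA)) (by simp [hB])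
  · exact ha.mpr (hb.mp hB)
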